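-- pv_equiv track=rewrite | github.com/claire196/myth | Solve the problem.py | MFP
-- ===== SOURCE A (Python) =====
-- def MFP (str1, str2):
--     if len(str1) != len(str2):
--         return 0
--     else:
--         for i in range(len(str1)):
--             if str1[i]==str2[(len(str2)-i-1)]:
--                 continue
--             else:
--                 return 0
--                 break
--         return 1
-- ===== SOURCE B (Python) =====
-- def MFP(str1, str2):
--     return int(str1 == str2[::-1])
-- ===== Notes on version B (the rewrite author's own statement) =====
-- stated objective: simpler
-- what changed: Replaces the length guard and explicit index loop with a single reversed-slice equality comparison wrapped in int().
import Mathlib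
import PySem

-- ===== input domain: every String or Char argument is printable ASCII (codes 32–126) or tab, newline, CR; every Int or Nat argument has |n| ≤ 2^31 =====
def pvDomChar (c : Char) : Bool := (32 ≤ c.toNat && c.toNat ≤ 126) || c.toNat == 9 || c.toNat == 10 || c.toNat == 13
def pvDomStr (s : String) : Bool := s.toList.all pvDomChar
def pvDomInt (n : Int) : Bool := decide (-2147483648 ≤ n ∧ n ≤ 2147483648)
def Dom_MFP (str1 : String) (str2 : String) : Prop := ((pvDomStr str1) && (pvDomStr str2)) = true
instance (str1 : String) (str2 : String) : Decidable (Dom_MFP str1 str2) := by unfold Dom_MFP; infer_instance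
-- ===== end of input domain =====

-- B replaces A's length guard and index loop by one reversed-list equality comparison (objective: simpler).

-- ===== PORT A =====
-- the for-loop with its early 'return 0': structural recursion on the index i
def MFP_loop (l1 l2 : List Char) (i : Nat) : Int :=
  if _h : i < l1.length then
    if PySem.List.pyGet? l1 (i : Int) = PySem.List.pyGet? l2 ((l2.length : Int) - (i : Int) - 1) then
      MFP_loop l1 l2 (i + 1)
    else 0
  else 1
termination_by l1.length - i

def MFP (str1 : String) (str2 : String) : Int :=
  if str1.toList.length ≠ str2.toList.length then 0
  else MFP_loop str1.toList str2.toList 0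

-- ===== PORT B =====
def MFP_alt (str1 : String) (str2 : String) : Int :=
  if str1.toList = str2.toList.reverse then 1 else 0

-- ===== PRECONDITION & SPEC =====
def Spec_MFP (str1 : String) (str2 : String) (out : Int) : Prop := out = MFP_alt str1 str2
instance (str1 : String) (str2 : String) (out : Int) : Decidable (Spec_MFP str1 str2 out) := by unfold Spec_MFP; infer_instance

-- ===== CLAIM (what is proved, stated in full; the proofs are below) =====
def Claim_equal_MFP : Prop := ∀ (str1 : String) (str2 : String), Dom_MFP str1 str2 → Spec_MFP str1 str2 (MFP str1 str2)

-- ===== LEMMAS AND PROOFS =====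

-- the loop from index i decides pointwise agreement of l1 with the reverse of l2 on [i, length)
theorem MFP_loop_eq (l1 l2 : List Char) (hlen : l1.length = l2.length) (i : Nat) :
    MFP_loop l1 l2 i =
      if ∀ j : Nat, i ≤ j → j < l1.length → l1[j]? = l2.reverse[j]? then 1 else 0 := by
  induction i using MFP_loop.induct l1 l2 with
  | case1 i h heq ih =>
      rw [MFP_loop, dif_pos h, if_pos heq, ih]
      have hgood : l1[i]? = l2.reverse[i]? := by
        have h2 : i < l2.length := hlen ▸ h
        have : ((l2.length : Int) - (i : Int) - 1) = ((l2.length - 1 - i : Nat) : Int) := by omega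
        rw [this, PySem.List.pyGet?_natCast, PySem.List.pyGet?_natCast] at heq
        rw [List.getElem?_reverse (by omega)]
        exact heq
      by_cases hall : ∀ j : Nat, i + 1 ≤ j → j < l1.length → l1[j]? = l2.reverse[j]?
      · rw [if_pos hall, if_pos]
        intro j hij hj
        rcases Nat.eq_or_lt_of_le hij with rfl | hlt
        · exact hgood
        · exact hall j hlt hj
      · rw [if_neg hall, if_neg]
        intro hall'
        exact hall fun j hij hj => hall' j (by omega) hj
  | case2 i h heq =>
      rw [MFP_loop, dif_pos h, if_neg heq, if_neg]
      intro hall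
      apply heq
      have h2 : i < l2.length := hlen ▸ h
      have hx : l1[i]? = l2.reverse[i]? := hall i le_rfl h
      rw [List.getElem?_reverse (by omega)] at hx
      have : ((l2.length : Int) - (i : Int) - 1) = ((l2.length - 1 - i : Nat) : Int) := by omega
      rw [this, PySem.List.pyGet?_natCast, PySem.List.pyGet?_natCast]
      exact hx
  | case3 i h =>
      rw [MFP_loop, dif_neg h, if_pos]
      intro j _ hj
      omega

-- ===== VERDICT (by name: the statement is the Claim_ definition above) =====
theorem MFP_spec : Claim_equal_MFP := by
  intro str1 str2 _
  unfold Spec_MFP MFP MFP_alt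
  set l1 := str1.toList
  set l2 := str2.toList
  by_cases hlen : l1.length = l2.length
  · rw [if_neg (by omega), MFP_loop_eq l1 l2 hlen 0]
    by_cases heq : l1 = l2.reverse
    · rw [if_pos (by intro j _ _; rw [heq]), if_pos heq]
    · rw [if_neg, if_neg heq]
      intro hall
      apply heq
      apply List.ext_getElem?
      intro j
      by_cases hj : j < l1.length
      · exact hall j (Nat.zero_le _) hj
      · rw [List.getElem?_eq_none (by omega), List.getElem?_eq_none (by simp; omega)]
  · rw [if_pos (by omega), if_neg]
    intro heq
    apply hlen
    rw [heq, List.length_reverse]
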